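-- pv_equiv track=rewrite | github.com/pypi-data/pypi-mirror-161 | packages/froModuleDrivers/froModuleDrivers-1.0.11.tar.gz/froModuleDrivers-1.0.11/froModuleDrivers/mCarDriver.py | cnvHexArrayToHex
-- ===== SOURCE A (Python) =====
-- def cnvHexArrayToHex(hex_array=None, scale=16):
--     if hex_array is None:
--         return 0
--     hex_len = len(hex_array)
--     result = 0
--     for i in range(hex_len):
--         result = result << scale
--         result |= hex_array[i]
--     return result
-- ===== SOURCE B (Python) =====
-- def cnvHexArrayToHex(hex_array=None, scale=16):
--     if hex_array is None:
--         return 0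
--
--     def merge(chunk):
--         n = len(chunk)
--         if n == 0:
--             return 0
--         if n == 1:
--             return chunk[0]
--         mid = n // 2
--         return (merge(chunk[:mid]) << (scale * (n - mid))) | merge(chunk[mid:])
--
--     return merge(hex_array)
-- ===== Notes on version B (the rewrite author's own statement) =====
-- stated objective: alternative
-- what changed: A shifts a single growing accumulator once per element; B merges the array by divide and conquer, OR-ing the shifted left half onto the right half - a different reassociation that does fewer big-int operations on nonnegative data but can be a log-factor slower when negative elements keep A's accumulator small.
-- outside the precondition, e.g. on cnvHexArrayToHex([1, 2], -4): A raises ValueError, B raises ValueError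
import Mathlib
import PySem

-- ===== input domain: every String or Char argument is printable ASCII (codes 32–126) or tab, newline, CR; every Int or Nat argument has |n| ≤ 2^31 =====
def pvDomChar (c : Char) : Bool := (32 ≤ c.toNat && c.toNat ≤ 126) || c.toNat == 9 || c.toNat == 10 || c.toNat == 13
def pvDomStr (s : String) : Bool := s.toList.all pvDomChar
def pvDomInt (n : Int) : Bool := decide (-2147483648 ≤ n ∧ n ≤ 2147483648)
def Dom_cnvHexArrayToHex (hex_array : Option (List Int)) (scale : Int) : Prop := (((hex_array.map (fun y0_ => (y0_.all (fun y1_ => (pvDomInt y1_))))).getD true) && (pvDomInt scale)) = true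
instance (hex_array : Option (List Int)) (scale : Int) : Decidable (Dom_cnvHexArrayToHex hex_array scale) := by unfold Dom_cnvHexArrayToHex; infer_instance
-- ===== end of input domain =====

-- B replaces A's one-shift-per-element accumulator loop by a divide-and-conquer merge that ORs the
-- shifted left half onto the right half (an alternative reassociation of the same OR/shift combination).

-- ===== PORT A =====
-- A's loop 'for i in range(hex_len): result = result << scale; result |= hex_array[i]'.
-- 'scale.toNat' is exact whenever a shift is executed: Pre_ guarantees 0 ≤ scale there
-- (Python raises ValueError on a negative shift count).
def cnvHexArrayToHex (hex_array : Option (List Int)) (scale : Int) : Int :=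
  match hex_array with
  | none => 0
  | some l =>
      (PySem.List.pyRange 0 (PySem.List.len l) 1).foldl
        (fun result i => PySem.Int.bor (result <<< scale.toNat) (PySem.List.pyGetD l i 0)) 0

-- ===== PORT B =====
-- B's recursive 'merge(chunk)': empty → 0, singleton → its element,
-- else (merge(left half) << (scale * len(right half))) | merge(right half).
def pvMergeHex (scale : Int) (l : List Int) : Int :=
  match l with
  | [] => 0
  | [x] => x
  | x :: y :: t =>
      let n := (x :: y :: t).length
      let mid := n / 2
      PySem.Int.bor
        ((pvMergeHex scale ((x :: y :: t).take mid)) <<< (scale * ((n : Int) - (mid : Int))).toNat)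
        (pvMergeHex scale ((x :: y :: t).drop mid))
termination_by l.length
decreasing_by
  · simp; omega
  · simp; omega

def cnvHexArrayToHex_alt (hex_array : Option (List Int)) (scale : Int) : Int :=
  match hex_array with
  | none => 0
  | some l => pvMergeHex scale l

-- ===== PRECONDITION & SPEC =====
-- Pre_ excludes exactly the inputs where Python A raises ValueError: a negative shift count
-- actually reached, i.e. scale < 0 with a non-empty list (None and [] return 0 before any shift).
def Pre_cnvHexArrayToHex (hex_array : Option (List Int)) (scale : Int) : Prop :=
  0 ≤ scale ∨ hex_array.getD [] = []
instance (hex_array : Option (List Int)) (scale : Int) : Decidable (Pre_cnvHexArrayToHex hex_array scale) := by unfold Pre_cnvHexArrayToHex; infer_instance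

def pvWitness_cnvHexArrayToHex : Option (List Int) × Int := (some [1, 2], 4)

def Spec_cnvHexArrayToHex (hex_array : Option (List Int)) (scale : Int) (out : Int) : Prop := out = cnvHexArrayToHex_alt hex_array scale
instance (hex_array : Option (List Int)) (scale : Int) (out : Int) : Decidable (Spec_cnvHexArrayToHex hex_array scale out) := by unfold Spec_cnvHexArrayToHex; infer_instance

-- ===== CLAIM (what is proved, stated in full; the proofs are below) =====
def Claim_equal_cnvHexArrayToHex : Prop := ∀ (hex_array : Option (List Int)) (scale : Int), Dom_cnvHexArrayToHex hex_array scale → Pre_cnvHexArrayToHex hex_array scale → Spec_cnvHexArrayToHex hex_array scale (cnvHexArrayToHex hex_array scale)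

-- ===== LEMMAS AND PROOFS =====

-- ---- Nat-level bit lemmas ----

theorem pv_add_eq_lor (x : Nat) : ∀ (y : Nat), x &&& y = 0 → x + y = x ||| y := by
  induction x using Nat.binaryRec with
  | zero => simp
  | bit b m ih =>
    intro y
    induction y using Nat.binaryRec with
    | zero => simp
    | bit c n _ =>
      intro h
      rw [Nat.land_bit, Nat.bit_eq_zero_iff] at h
      obtain ⟨hmn, hbc⟩ := h
      rw [Nat.lor_bit, Nat.bit_val, Nat.bit_val, Nat.bit_val, ← ih n hmn]
      clear ih
      cases b <;> cases c <;>
        simp only [Bool.and_true, Bool.and_false] at hbc <;>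
        simp only [Bool.or_self, Bool.or_true, Bool.or_false,
          Bool.toNat_true, Bool.toNat_false] <;>
        first
        | exact Bool.noConfusion hbc
        | omega

theorem pv_ldiff_lor_land (c d : Nat) : (c.ldiff d) ||| (c &&& d) = c := by
  apply Nat.eq_of_testBit_eq
  intro i
  simp only [Nat.testBit_lor, Nat.testBit_ldiff, Nat.testBit_land]
  cases c.testBit i <;> cases d.testBit i <;> rfl

theorem pv_ldiff_land_disjoint (c d : Nat) : (c.ldiff d) &&& (c &&& d) = 0 := by
  apply Nat.eq_of_testBit_eq
  intro i
  simp only [Nat.testBit_land, Nat.testBit_ldiff, Nat.zero_testBit]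
  cases c.testBit i <;> cases d.testBit i <;> rfl

theorem pv_sub_land (c d : Nat) : c - (c &&& d) = c.ldiff d := by
  have h := pv_add_eq_lor (c.ldiff d) (c &&& d) (pv_ldiff_land_disjoint c d)
  rw [pv_ldiff_lor_land] at h
  omega

theorem pv_shift_low_disjoint (c n : Nat) : (c <<< n) &&& (2 ^ n - 1) = 0 := by
  apply Nat.eq_of_testBit_eq
  intro i
  simp only [Nat.testBit_land, Nat.testBit_shiftLeft, Nat.testBit_two_pow_sub_one, Nat.zero_testBit]
  by_cases h : n ≤ i
  · simp [h, Nat.not_lt.mpr h]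
  · simp [h]

theorem pv_shift_add_low (c n : Nat) : c * 2 ^ n + (2 ^ n - 1) = (c <<< n) ||| (2 ^ n - 1) := by
  rw [← Nat.shiftLeft_eq]
  exact pv_add_eq_lor _ _ (pv_shift_low_disjoint c n)

-- ---- an Int "test bit" (two's-complement view) and extensionality ----

def pvTb (a : Int) (k : Nat) : Bool :=
  if 0 ≤ a then a.toNat.testBit k else !((-a - 1).toNat.testBit k)

theorem pvTb_ext {a b : Int} (h : ∀ k, pvTb a k = pvTb b k) : a = b := by
  unfold pvTb at h
  by_cases ha : 0 ≤ a <;> by_cases hb : 0 ≤ b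
  · simp only [if_pos ha, if_pos hb] at h
    have := Nat.eq_of_testBit_eq h
    omega
  · exfalso
    simp only [if_pos ha, if_neg hb] at h
    have h2 := h (a.toNat + (-b - 1).toNat)
    rw [Nat.testBit_lt_two_pow (lt_of_le_of_lt (Nat.le_add_right _ _) Nat.lt_two_pow_self),
        Nat.testBit_lt_two_pow (lt_of_le_of_lt (Nat.le_add_left _ _) Nat.lt_two_pow_self)] at h2
    simp at h2
  · exfalso
    simp only [if_neg ha, if_pos hb] at h
    have h2 := h ((-a - 1).toNat + b.toNat)
    rw [Nat.testBit_lt_two_pow (lt_of_le_of_lt (Nat.le_add_right _ _) Nat.lt_two_pow_self),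
        Nat.testBit_lt_two_pow (lt_of_le_of_lt (Nat.le_add_left _ _) Nat.lt_two_pow_self)] at h2
    simp at h2
  · simp only [if_neg ha, if_neg hb] at h
    have : ∀ k, (-a - 1).toNat.testBit k = (-b - 1).toNat.testBit k := by
      intro k; have := h k; simpa using this
    have := Nat.eq_of_testBit_eq this
    omega

theorem pvTb_bor (a b : Int) (k : Nat) : pvTb (PySem.Int.bor a b) k = (pvTb a k || pvTb b k) := by
  unfold pvTb PySem.Int.bor
  by_cases ha : 0 ≤ a <;> by_cases hb : 0 ≤ b
  · have h1 : (0:Int) ≤ ((a.toNat ||| b.toNat : Nat) : Int) := Int.natCast_nonneg _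
    simp [ha, hb, h1]
  · have hd : (0:Int) ≤ ((-b - 1).toNat - ((-b - 1).toNat &&& a.toNat) : Nat) := Int.natCast_nonneg _
    have h1 : ¬ (0:Int) ≤ -(((-b - 1).toNat - ((-b - 1).toNat &&& a.toNat) : Nat) : Int) - 1 := by omega
    simp only [if_pos ha, if_neg hb, if_neg h1]
    have h2 : (-(-(((-b - 1).toNat - ((-b - 1).toNat &&& a.toNat) : Nat) : Int) - 1) - 1).toNat
        = (-b - 1).toNat - ((-b - 1).toNat &&& a.toNat) := by omega
    rw [h2, pv_sub_land, Nat.testBit_ldiff]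
    cases hx : a.toNat.testBit k <;> cases hy : (-b - 1).toNat.testBit k <;> rfl
  · have h1 : ¬ (0:Int) ≤ -(((-a - 1).toNat - ((-a - 1).toNat &&& b.toNat) : Nat) : Int) - 1 := by
      have : (0:Int) ≤ (((-a - 1).toNat - ((-a - 1).toNat &&& b.toNat) : Nat) : Int) := Int.natCast_nonneg _
      omega
    simp only [if_neg ha, if_pos hb, if_neg h1]
    have h2 : (-(-(((-a - 1).toNat - ((-a - 1).toNat &&& b.toNat) : Nat) : Int) - 1) - 1).toNat
        = (-a - 1).toNat - ((-a - 1).toNat &&& b.toNat) := by omega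
    rw [h2, pv_sub_land, Nat.testBit_ldiff]
    cases hx : (-a - 1).toNat.testBit k <;> cases hy : b.toNat.testBit k <;> rfl
  · have h1 : ¬ (0:Int) ≤ -(((-a - 1).toNat &&& (-b - 1).toNat : Nat) : Int) - 1 := by
      have : (0:Int) ≤ (((-a - 1).toNat &&& (-b - 1).toNat : Nat) : Int) := Int.natCast_nonneg _
      omega
    simp only [if_neg ha, if_neg hb, if_neg h1]
    have h2 : (-(-(((-a - 1).toNat &&& (-b - 1).toNat : Nat) : Int) - 1) - 1).toNat
        = (-a - 1).toNat &&& (-b - 1).toNat := by omega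
    rw [h2, Nat.testBit_land]
    cases hx : (-a - 1).toNat.testBit k <;> cases hy : (-b - 1).toNat.testBit k <;> rfl

theorem pv_natCast_shiftLeft (x n : Nat) : ((x : Int) <<< n) = ((x <<< n : Nat) : Int) := by
  rw [Int.shiftLeft_eq, Nat.shiftLeft_eq]
  push_cast
  ring

theorem pv_neg_shiftLeft (c n : Nat) :
    ((-(c : Int) - 1) <<< n) = -((c <<< n ||| (2 ^ n - 1) : Nat) : Int) - 1 := by
  rw [Int.shiftLeft_eq, ← pv_shift_add_low]
  have h1 : (0:Nat) < 2 ^ n := Nat.two_pow_pos n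
  push_cast [h1]
  ring

theorem pvTb_shiftLeft (a : Int) (n k : Nat) :
    pvTb (a <<< n) k = (decide (n ≤ k) && pvTb a (k - n)) := by
  by_cases ha : 0 ≤ a
  · rw [← Int.toNat_of_nonneg ha, pv_natCast_shiftLeft]
    unfold pvTb
    rw [if_pos (Int.natCast_nonneg _ : (0:Int) ≤ ((a.toNat <<< n : Nat) : Int)),
        if_pos (Int.natCast_nonneg _ : (0:Int) ≤ ((a.toNat : Nat) : Int))]
    rw [Int.toNat_natCast, Int.toNat_natCast, Nat.testBit_shiftLeft]
  · have hc : a = -((-a - 1).toNat : Int) - 1 := by omega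
    rw [hc, pv_neg_shiftLeft]
    unfold pvTb
    set c := (-a - 1).toNat with hcdef
    have h1 : ¬ (0:Int) ≤ -((c <<< n ||| (2 ^ n - 1) : Nat) : Int) - 1 := by
      have : (0:Int) ≤ ((c <<< n ||| (2 ^ n - 1) : Nat) : Int) := Int.natCast_nonneg _
      omega
    have h2 : ¬ (0:Int) ≤ -(c : Int) - 1 := by
      have : (0:Int) ≤ (c : Int) := Int.natCast_nonneg _
      omega
    simp only [if_neg h1, if_neg h2]
    have h3 : (-(-((c <<< n ||| (2 ^ n - 1) : Nat) : Int) - 1) - 1).toNat = c <<< n ||| (2 ^ n - 1) := by omega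
    have h4 : (-(-(c : Int) - 1) - 1).toNat = c := by omega
    rw [h3, h4, Nat.testBit_lor, Nat.testBit_shiftLeft, Nat.testBit_two_pow_sub_one]
    by_cases h : n ≤ k
    · simp [h, ge_iff_le, Nat.not_lt.mpr h]
    · simp [h, Nat.lt_of_not_le h]

-- ---- Int-level algebra of bor and shiftLeft ----

theorem pv_bor_assoc (a b c : Int) :
    PySem.Int.bor (PySem.Int.bor a b) c = PySem.Int.bor a (PySem.Int.bor b c) := by
  apply pvTb_ext
  intro k
  simp [pvTb_bor, Bool.or_assoc]

theorem pv_zero_bor (a : Int) : PySem.Int.bor 0 a = a := by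
  rw [PySem.Int.bor_comm, PySem.Int.bor_zero]

theorem pv_shiftLeft_bor (a b : Int) (n : Nat) :
    (PySem.Int.bor a b) <<< n = PySem.Int.bor (a <<< n) (b <<< n) := by
  apply pvTb_ext
  intro k
  simp [pvTb_bor, pvTb_shiftLeft, Bool.and_or_distrib_left]

theorem pv_shiftLeft_shiftLeft (a : Int) (m n : Nat) : (a <<< m) <<< n = a <<< (m + n) := by
  simp only [Int.shiftLeft_eq, pow_add]
  ring

theorem pv_zero_shiftLeft (n : Nat) : (0 : Int) <<< n = 0 := by
  simp [Int.shiftLeft_eq]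

-- ---- characterising A's fold ----

theorem pv_foldA_shift (s : Nat) :
    ∀ (l : List Int) (r : Int),
      l.foldl (fun acc x => PySem.Int.bor (acc <<< s) x) r
        = PySem.Int.bor (r <<< (s * l.length))
            (l.foldl (fun acc x => PySem.Int.bor (acc <<< s) x) 0) := by
  intro l
  induction l with
  | nil => intro r; simp [PySem.Int.bor_zero]
  | cons x t ih =>
    intro r
    simp only [List.foldl_cons, List.length_cons]
    rw [ih (PySem.Int.bor (r <<< s) x), ih (PySem.Int.bor ((0:Int) <<< s) x)]
    rw [pv_zero_shiftLeft, pv_zero_bor, pv_shiftLeft_bor, pv_shiftLeft_shiftLeft, pv_bor_assoc]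
    have : s + s * t.length = s * (t.length + 1) := by ring
    rw [this]

theorem pv_foldA_append (s : Nat) (l1 l2 : List Int) :
    (l1 ++ l2).foldl (fun acc x => PySem.Int.bor (acc <<< s) x) 0
      = PySem.Int.bor
          ((l1.foldl (fun acc x => PySem.Int.bor (acc <<< s) x) 0) <<< (s * l2.length))
          (l2.foldl (fun acc x => PySem.Int.bor (acc <<< s) x) 0) := by
  rw [List.foldl_append, pv_foldA_shift]

-- ---- B's merge computes A's fold (for a nonnegative scale) ----

theorem pv_shift_amount (s n mid : Nat) (h : mid ≤ n) :
    ((s : Int) * ((n : Int) - (mid : Int))).toNat = s * (n - mid) := by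
  have h1 : ((n : Int) - (mid : Int)) = ((n - mid : Nat) : Int) := by omega
  rw [h1, ← Int.natCast_mul, Int.toNat_natCast]

theorem pv_merge_eq_fold (s : Nat) :
    ∀ (fuel : Nat) (l : List Int), l.length ≤ fuel →
      pvMergeHex (s : Int) l = l.foldl (fun acc x => PySem.Int.bor (acc <<< s) x) 0 := by
  intro fuel
  induction fuel with
  | zero =>
    intro l h
    have : l = [] := List.eq_nil_of_length_eq_zero (Nat.le_zero.mp h)
    subst this
    simp [pvMergeHex]
  | succ m ih =>
    intro l h
    match l with
    | [] => simp [pvMergeHex]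
    | [x] => simp [pvMergeHex, pv_zero_bor]
    | x :: y :: t =>
      rw [pvMergeHex]
      have hlen : (x :: y :: t).length = t.length + 2 := by simp
      have hmid1 : 1 ≤ (x :: y :: t).length / 2 := by omega
      have hmid2 : (x :: y :: t).length / 2 < (x :: y :: t).length := by omega
      have htake : ((x :: y :: t).take ((x :: y :: t).length / 2)).length
          = (x :: y :: t).length / 2 := by
        simp [List.length_take]; omega
      have hdrop : ((x :: y :: t).drop ((x :: y :: t).length / 2)).length
          = (x :: y :: t).length - (x :: y :: t).length / 2 := by
        simp [List.length_drop]
      rw [ih _ (by omega : ((x :: y :: t).take ((x :: y :: t).length / 2)).length ≤ m),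
          ih _ (by omega : ((x :: y :: t).drop ((x :: y :: t).length / 2)).length ≤ m)]
      rw [pv_shift_amount s _ _ (Nat.le_of_lt hmid2)]
      conv_rhs => rw [← List.take_append_drop ((x :: y :: t).length / 2) (x :: y :: t)]
      rw [pv_foldA_append, hdrop]

-- ===== VERDICT (by name: the statement is the Claim_ definition above) =====
theorem cnvHexArrayToHex_spec : Claim_equal_cnvHexArrayToHex := by
  intro hex_array scale _ hpre
  unfold Spec_cnvHexArrayToHex
  match hex_array with
  | none => rfl
  | some [] =>
    simp [cnvHexArrayToHex, cnvHexArrayToHex_alt, pvMergeHex, PySem.List.len,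
      PySem.List.pyRange_one_eq_nil]
  | some (x :: t) =>
    have hs : 0 ≤ scale := by
      rcases hpre with h | h
      · exact h
      · simp [Option.getD] at h
    obtain ⟨s, rfl⟩ := Int.eq_ofNat_of_zero_le hs
    show cnvHexArrayToHex (some (x :: t)) (s : Int) = cnvHexArrayToHex_alt (some (x :: t)) (s : Int)
    simp only [cnvHexArrayToHex, cnvHexArrayToHex_alt]
    rw [PySem.List.foldl_pyRange_zero_pyGetD (x :: t) 0
        (fun acc v => PySem.Int.bor (acc <<< ((s : Int)).toNat) v) 0]
    rw [pv_merge_eq_fold s (x :: t).length (x :: t) (Nat.le_refl _)]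
    simp [Int.toNat_natCast]
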